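-- pv_equiv track=rewrite | github.com/Aasthaengg/IBMdataset | Python_codes/p03476/s170008866.py | partial_sums
-- ===== SOURCE A (Python) =====
-- def generate_is_prime_sieve(N):
-- 	is_prime = [True]*(N+1)
-- 	is_prime[0] = is_prime[1] = False
-- 	for p in range(2,N+1):
-- 		if is_prime[p]:
-- 			for n in range(2*p,N+1,p):
-- 				is_prime[n] = False
-- 	dummy=[x for x in is_prime]
-- 	for p in range(2,N+1):
-- 		if is_prime[p] and is_prime[(p+1)//2]:
-- 			dummy[p]=True
-- 		else:
-- 			dummy[p]=False
-- 	return dummy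
--
-- def partial_sums(N):
-- 	something=generate_is_prime_sieve(N)
-- 	counter=0
-- 	partial_sum=[0]*(N+1)
-- 	for i in range(N+1):
-- 		if something[i]:
-- 			counter+=1
-- 		partial_sum[i]=counter
-- 	return partial_sum
-- ===== SOURCE B (Python) =====
-- def is_prime(k):
--     if k < 2:
--         return False
--     d = 2
--     while d * d <= k:
--         if k % d == 0:
--             return False
--         d += 1
--     return True
--
-- def partial_sums(N):
--     counter = 0
--     out = []
--     for i in range(N + 1):
--         if is_prime(i) and is_prime((i + 1) // 2):
--             counter += 1
--         out.append(counter)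
--     return out
-- ===== Notes on version B (the rewrite author's own statement) =====
-- stated objective: alternative
-- what changed: Replaced the Eratosthenes sieve (boolean array with multiple marking/copy passes and a preallocated result array written by index) with a per-number trial-division is_prime helper and a single pass that appends the running counter.
import Mathlib
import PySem

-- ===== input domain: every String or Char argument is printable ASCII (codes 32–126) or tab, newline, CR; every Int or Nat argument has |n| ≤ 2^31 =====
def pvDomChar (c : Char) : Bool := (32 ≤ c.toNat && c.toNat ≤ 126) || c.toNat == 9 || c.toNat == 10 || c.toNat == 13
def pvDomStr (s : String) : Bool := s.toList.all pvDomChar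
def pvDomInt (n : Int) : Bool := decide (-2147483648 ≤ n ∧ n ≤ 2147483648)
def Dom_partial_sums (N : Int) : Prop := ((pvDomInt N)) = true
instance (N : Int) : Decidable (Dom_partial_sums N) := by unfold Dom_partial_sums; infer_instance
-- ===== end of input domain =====

-- B replaces A's Eratosthenes sieve (three marking/copy passes over boolean arrays) by a
-- per-number trial-division primality test and a single appending pass; alternative, not faster.

-- ===== PORT A =====
-- helpers naming the pieces of generate_is_prime_sieve's first loop
def pvMark (N : Int) (l : List Bool) (p : Int) : List Bool :=
  (PySem.List.pyRange (2*p) (N+1) p).foldl (fun a i => PySem.List.pySetD a i false) l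
def pvSieveStep (N : Int) (l : List Bool) (p : Int) : List Bool :=
  if PySem.List.pyGetD l p false then pvMark N l p else l
def pvBase (N : Int) : List Bool :=
  PySem.List.pySetD (PySem.List.pySetD (List.replicate (N+1).toNat true) 0 false) 1 false
def pvSieve (N : Int) : List Bool :=
  (PySem.List.pyRange 2 (N+1) 1).foldl (pvSieveStep N) (pvBase N)

def generate_is_prime_sieve (N : Int) : List Bool :=
  let is_prime := pvSieve N
  let dummy := is_prime.map (fun x => x)
  (PySem.List.pyRange 2 (N+1) 1).foldl
    (fun d p =>
      if PySem.List.pyGetD is_prime p false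
          && PySem.List.pyGetD is_prime (PySem.Int.floordiv (p+1) 2) false
        then PySem.List.pySetD d p true else PySem.List.pySetD d p false) dummy

def partial_sums (N : Int) : List Int :=
  let something := generate_is_prime_sieve N
  ((PySem.List.pyRange 0 (N+1) 1).foldl
    (fun (st : Int × List Int) i =>
      let c := if PySem.List.pyGetD something i false then st.1 + 1 else st.1
      (c, PySem.List.pySetD st.2 i c))
    (0, List.replicate (N+1).toNat 0)).2

-- ===== PORT B =====
-- 'while d*d <= k' trial-division loop of Source B's is_prime; the Nat fuel only makes the
-- recursion structural, k.toNat steps are more than the loop can take (proved in pv_go)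
def is_prime_go (k d : Int) : Nat → Bool
  | 0 => true
  | fuel+1 =>
    if d * d ≤ k then
      (if PySem.Int.mod k d == 0 then false else is_prime_go k (d+1) fuel)
    else true

def pyIsPrime (k : Int) : Bool := if k < 2 then false else is_prime_go k 2 k.toNat

def partial_sums_alt (N : Int) : List Int :=
  ((PySem.List.pyRange 0 (N+1) 1).foldl
    (fun (st : Int × List Int) i =>
      let c := if pyIsPrime i && pyIsPrime (PySem.Int.floordiv (i+1) 2) then st.1 + 1 else st.1
      (c, st.2 ++ [c]))
    (0, [])).2

-- ===== PRECONDITION & SPEC =====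
-- Pre_ excludes N ≤ 0, where A raises IndexError (is_prime[0]/is_prime[1] on a too-short list).
def Pre_partial_sums (N : Int) : Prop := 1 ≤ N
instance (N : Int) : Decidable (Pre_partial_sums N) := by unfold Pre_partial_sums; infer_instance
def pvWitness_partial_sums : Int := (5)

def Spec_partial_sums (N : Int) (out : List Int) : Prop := out = partial_sums_alt N
instance (N : Int) (out : List Int) : Decidable (Spec_partial_sums N out) := by unfold Spec_partial_sums; infer_instance

-- ===== CLAIM (what is proved, stated in full; the proofs are below) =====
def Claim_equal_partial_sums : Prop := ∀ (N : Int), Dom_partial_sums N → Pre_partial_sums N → Spec_partial_sums N (partial_sums N)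

-- ===== LEMMAS AND PROOFS =====

-- the common flag: i counts iff i and (i+1)//2 are both prime
def pvFlag (m : Nat) : Bool := decide (Nat.Prime m) && decide (Nat.Prime ((m+1)/2))
-- prefix count of flags below t
def pvC (t : Nat) : Int := ((List.range t).countP pvFlag : Int)
-- invariant of the sieve's first loop after processing p = 2..q
def pvGood (q m : Nat) : Prop := 2 ≤ m ∧ ∀ r : Nat, r.Prime → r ≤ q → r ∣ m → r = m

lemma pv_getD_set (l : List Bool) (j m : Nat) (v d : Bool) :
    (l.set j v).getD m d = if j = m ∧ m < l.length then v else l.getD m d := by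
  simp only [List.getD_eq_getElem?_getD, List.getElem?_set]
  split_ifs with h1 h2 h3 <;> simp_all <;> omega

lemma pv_foldl_setFalse (xs : List Int) (l : List Bool) (hx : ∀ x ∈ xs, 0 ≤ x) :
    (xs.foldl (fun a i => PySem.List.pySetD a i false) l).length = l.length ∧
    ∀ m : Nat, (xs.foldl (fun a i => PySem.List.pySetD a i false) l).getD m false =
      if (∃ x ∈ xs, x.toNat = m) then false else l.getD m false := by
  induction xs generalizing l with
  | nil => simp
  | cons x xs ih =>
    have hx0 : (0:Int) ≤ x := hx x (by simp)
    have hrest : ∀ y ∈ xs, (0:Int) ≤ y := fun y hy => hx y (by simp [hy])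
    simp only [List.foldl_cons, PySem.List.pySetD_of_nonneg _ _ hx0]
    obtain ⟨ihlen, ihget⟩ := ih (l.set x.toNat false) hrest
    constructor
    · simp [ihlen]
    · intro m
      rw [ihget m, pv_getD_set]
      by_cases hxm : x.toNat = m
      · subst hxm
        by_cases hmem : ∃ y ∈ xs, y.toNat = x.toNat
        · simp [hmem]
        · simp [hmem]
          intro h
          simp [List.getElem?_eq_none h]
      · by_cases hmem : ∃ y ∈ xs, y.toNat = m
        · simp [hmem, hxm]
        · simp [hmem, hxm]

lemma pv_mark (N : Int) (l : List Bool) (p : Int) (hp : 2 ≤ p) :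
    (pvMark N l p).length = l.length ∧
    ∀ m : Nat, (pvMark N l p).getD m false =
      if (p ∣ (m:Int) ∧ 2*p ≤ (m:Int) ∧ (m:Int) ≤ N) then false else l.getD m false := by
  have hps : (0:Int) < p := by omega
  have hx : ∀ x ∈ PySem.List.pyRange (2*p) (N+1) p, (0:Int) ≤ x := by
    intro x hxm
    rw [PySem.List.mem_pyRange_iff_of_pos hps] at hxm
    omega
  obtain ⟨hlen, hget⟩ := pv_foldl_setFalse (PySem.List.pyRange (2*p) (N+1) p) l hx
  refine ⟨hlen, fun m => ?_⟩
  rw [pvMark, hget m]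
  congr 1
  simp only [eq_iff_iff]
  constructor
  · rintro ⟨x, hxm, rfl⟩
    rw [PySem.List.mem_pyRange_iff_of_pos hps] at hxm
    obtain ⟨h1, h2, h3⟩ := hxm
    have hx0 : (0:Int) ≤ x := by omega
    rw [Int.toNat_of_nonneg hx0]
    refine ⟨?_, by omega, by omega⟩
    have : p ∣ (x - 2*p) + 2*p := dvd_add h3 ⟨2, by ring⟩
    simpa using this
  · rintro ⟨h1, h2, h3⟩
    refine ⟨(m:Int), ?_, by simp⟩
    rw [PySem.List.mem_pyRange_iff_of_pos hps]
    exact ⟨by omega, by omega, by simpa using dvd_sub h1 ⟨2, by ring⟩⟩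

lemma pv_go (k : Int) (hk : 2 ≤ k) : ∀ (fuel : Nat) (d : Int), 2 ≤ d → (k+1-d).toNat ≤ fuel →
    (is_prime_go k d fuel = true ↔ ∀ e : Int, d ≤ e → e*e ≤ k → ¬ (e ∣ k)) := by
  intro fuel
  induction fuel with
  | zero =>
    intro d hd hf
    have hdk : k < d := by omega
    apply iff_of_true rfl
    intro e he hee hdvd
    nlinarith
  | succ fuel ih =>
    intro d hd hf
    show (if d * d ≤ k then
        (if PySem.Int.mod k d == 0 then false else is_prime_go k (d+1) fuel)
      else true) = true ↔ _
    by_cases hle : d * d ≤ k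
    · rw [if_pos hle]
      by_cases hmod : PySem.Int.mod k d == 0
      · rw [if_pos hmod]
        have hdvd : d ∣ k := by simpa [PySem.Int.mod_eq_zero_iff_dvd] using hmod
        exact iff_of_false (by simp) (fun h => h d le_rfl hle hdvd)
      · rw [if_neg hmod]
        have hdk : d ≤ k := by nlinarith [mul_self_nonneg d]
        rw [ih (d+1) (by omega) (by omega)]
        have hnd : ¬ (d ∣ k) := by simpa [PySem.Int.mod_eq_zero_iff_dvd] using hmod
        constructor
        · intro h e he hee hdvd
          rcases eq_or_lt_of_le he with rfl | hlt
          · exact hnd hdvd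
          · exact h e (by omega) hee hdvd
        · intro h e he hee
          exact h e (by omega) hee
    · rw [if_neg hle]
      apply iff_of_true rfl
      intro e he hee hdvd
      nlinarith

lemma pv_isPrime (m : Nat) : pyIsPrime (m : Int) = decide (Nat.Prime m) := by
  by_cases h2 : m < 2
  · interval_cases m <;> simp [pyIsPrime] <;> decide
  · push_neg at h2
    have hm2 : (2:Int) ≤ (m:Int) := by exact_mod_cast h2
    have hiff := pv_go (m:Int) hm2 ((m:Int).toNat) 2 le_rfl (by omega)
    have hchar : (∀ e : Int, 2 ≤ e → e*e ≤ (m:Int) → ¬ (e ∣ (m:Int))) ↔ Nat.Prime m := by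
      constructor
      · intro h
        rw [Nat.prime_def_le_sqrt]
        refine ⟨h2, fun r hr hsq hdvd => ?_⟩
        have hrr : r * r ≤ m := Nat.le_sqrt.mp hsq
        exact h (r:Int) (by exact_mod_cast hr) (by exact_mod_cast hrr)
          (by exact_mod_cast hdvd)
      · intro hp e he hee hdvd
        have he0 : (0:Int) ≤ e := by omega
        set r := e.toNat with hr
        have her : (r:Int) = e := Int.toNat_of_nonneg he0
        have hrdvd : r ∣ m := by
          rw [← Int.natCast_dvd_natCast]
          rw [her]; exact hdvd
        rcases (Nat.Prime.eq_one_or_self_of_dvd hp r hrdvd) with h1 | hself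
        · omega
        · have hmmi : (r:Int) * (r:Int) ≤ (m:Int) := by rw [her]; exact hee
          have hmm : r * r ≤ m := by exact_mod_cast hmmi
          have hr2 : 2 ≤ r := by omega
          have hrm : r = m := hself
          nlinarith
    unfold pyIsPrime
    rw [if_neg (by omega)]
    by_cases hp : Nat.Prime m
    · have hgo : is_prime_go (m:Int) 2 ((m:Int)).toNat = true := hiff.mpr (hchar.mpr hp)
      rw [Int.toNat_natCast] at hgo
      simp [hp, hgo]
    · have hgo : ¬ (is_prime_go (m:Int) 2 ((m:Int)).toNat = true) :=
        fun h => hp (hchar.mp (hiff.mp h))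
      rw [Int.toNat_natCast] at hgo
      simp [hp, Bool.not_eq_true] at hgo ⊢
      exact hgo

lemma pv_base (N : Int) (hN : 1 ≤ N) :
    (pvBase N).length = (N+1).toNat ∧
    ∀ m : Nat, (pvBase N).getD m false = decide (2 ≤ m ∧ m < (N+1).toNat) := by
  have hn : 2 ≤ (N+1).toNat := by omega
  unfold pvBase
  rw [PySem.List.pySetD_of_nonneg _ _ (by norm_num), PySem.List.pySetD_of_nonneg _ _ (by norm_num)]
  constructor
  · simp
  · intro m
    rw [pv_getD_set, pv_getD_set]
    simp only [List.length_set, List.length_replicate, Int.toNat_one, Int.toNat_zero]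
    rw [List.getD_eq_getElem?_getD, List.getElem?_replicate]
    split_ifs with a b c
    · symm
      rw [decide_eq_false_iff_not]
      obtain ⟨h1, -⟩ := a
      omega
    · symm
      rw [decide_eq_false_iff_not]
      obtain ⟨h0, -⟩ := b
      omega
    · have hm1 : m ≠ 1 := fun h => a ⟨h.symm, by omega⟩
      have hm0 : m ≠ 0 := fun h => b ⟨h.symm, by omega⟩
      symm
      rw [Option.getD_some, decide_eq_true_eq]
      exact ⟨by omega, c⟩
    · symm
      rw [Option.getD_none, decide_eq_false_iff_not]
      exact fun h => c h.2

lemma pv_stage (N : Int) (hN : 1 ≤ N) (q : Nat) (h1 : 1 ≤ q) (hq : (q:Int) ≤ N) :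
    ((PySem.List.pyRange 2 ((q:Int)+1) 1).foldl (pvSieveStep N) (pvBase N)).length = (N+1).toNat ∧
    ∀ m : Nat, m < (N+1).toNat →
      (((PySem.List.pyRange 2 ((q:Int)+1) 1).foldl (pvSieveStep N) (pvBase N)).getD m false = true ↔ pvGood q m) := by
  induction q with
  | zero => omega
  | succ q ih =>
    by_cases hq0 : q = 0
    · -- base: q+1 = 1, range 2 2 = []
      subst hq0
      have h2 : (((0+1:Nat)):Int)+1 = (2:Int) := by norm_num
      rw [h2, PySem.List.pyRange_one_eq_nil le_rfl]
      simp only [List.foldl_nil]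
      obtain ⟨hlen, hget⟩ := pv_base N hN
      refine ⟨hlen, fun m hm => ?_⟩
      rw [hget m, decide_eq_true_eq]
      constructor
      · rintro ⟨h2m, -⟩
        refine ⟨h2m, fun r hr hle _ => ?_⟩
        have := hr.two_le
        omega
      · rintro ⟨h2m, -⟩
        exact ⟨h2m, hm⟩
    · -- step: q ≥ 1
      have hq1 : 1 ≤ q := by omega
      have hqN : (q:Int) ≤ N := by push_cast at hq ⊢; omega
      obtain ⟨ihlen, ihget⟩ := ih hq1 hqN
      have hsplit : PySem.List.pyRange 2 ((((q+1):Nat):Int)+1) 1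
          = PySem.List.pyRange 2 ((q:Int)+1) 1 ++ [(q:Int)+1] := by
        have : ((((q+1):Nat)):Int)+1 = ((q:Int)+1)+1 := by push_cast; ring
        rw [this, PySem.List.pyRange_one_succ_right (by omega)]
      rw [hsplit, List.foldl_append]
      set L := (PySem.List.pyRange 2 ((q:Int)+1) 1).foldl (pvSieveStep N) (pvBase N) with hL
      set p : Nat := q + 1 with hp
      have hcast : ((q:Int)+1) = ((p:Nat):Int) := by rw [hp]; push_cast; ring
      have hpn : p < (N+1).toNat := by omega
      have hp2 : 2 ≤ p := by omega
      simp only [List.foldl_cons, List.foldl_nil]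
      unfold pvSieveStep
      rw [hcast, PySem.List.pyGetD_natCast]
      by_cases hprime : Nat.Prime p
      · -- p prime: L[p] = true, marking happens
        have hLp : L.getD p false = true := by
          rw [ihget p hpn]
          refine ⟨hp2, fun r hr hle hdvd => ?_⟩
          rcases hprime.eq_one_or_self_of_dvd r hdvd with h | h
          · exact absurd h (by have := hr.two_le; omega)
          · exact h
        rw [hLp, if_pos rfl]
        obtain ⟨mklen, mkget⟩ := pv_mark N L ((p:Nat):Int) (by exact_mod_cast hp2)
        refine ⟨by rw [mklen, ihlen], fun m hm => ?_⟩
        rw [mkget m]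
        have hmN : ((m:Nat):Int) ≤ N := by omega
        by_cases hmark : ((p:Nat):Int) ∣ ((m:Nat):Int) ∧ 2*((p:Nat):Int) ≤ ((m:Nat):Int) ∧ ((m:Nat):Int) ≤ N
        · rw [if_pos hmark]
          refine iff_of_false (by simp) ?_
          rintro ⟨h2m, hall⟩
          have hpd : p ∣ m := by exact_mod_cast hmark.1
          have := hall p hprime le_rfl hpd
          have h2pm : 2*p ≤ m := by exact_mod_cast hmark.2.1
          omega
        · rw [if_neg hmark, ihget m hm]
          constructor
          · rintro ⟨h2m, hall⟩
            refine ⟨h2m, fun r hr hle hdvd => ?_⟩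
            by_cases hrp : r = p
            · subst hrp
              -- r = p divides m, unmarked ⇒ m < 2p ⇒ m = p
              have hdInt : ((p:Nat):Int) ∣ ((m:Nat):Int) := by exact_mod_cast hdvd
              have hlt : m < 2*p := by
                by_contra hge
                exact hmark ⟨hdInt, by push_cast; omega, hmN⟩
              have hple : p ≤ m := Nat.le_of_dvd (by omega) hdvd
              obtain ⟨c, rfl⟩ := hdvd
              have hc1 : 1 ≤ c := by
                rcases Nat.eq_zero_or_pos c with rfl | h
                · simp at h2m
                · omega
              have hc2 : c < 2 := by
                by_contra hge
                push_neg at hge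
                have : 2*p ≤ p*c := by nlinarith
                omega
              have : c = 1 := by omega
              subst this
              simp
            · exact hall r hr (by omega) hdvd
          · rintro ⟨h2m, hall⟩
            exact ⟨h2m, fun r hr hle hdvd => hall r hr (by omega) hdvd⟩
      · -- p not prime: L[p] = false, nothing happens
        have hLp : L.getD p false = false := by
          have hiff := ihget p hpn
          rcases Bool.eq_false_or_eq_true (L.getD p false) with h | h
          swap
          · exact h
          · exfalso
            obtain ⟨-, hall⟩ := hiff.mp h
            have hne1 : p ≠ 1 := by omega
            have hpf := Nat.minFac_prime hne1
            have hdvd := Nat.minFac_dvd p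
            have hle : p.minFac ≤ p := Nat.minFac_le (by omega)
            have hnep : p.minFac ≠ p := fun hcontra => hprime (hcontra ▸ hpf)
            have := hall p.minFac hpf (by omega) hdvd
            exact hnep this
        rw [hLp, if_neg Bool.false_ne_true]
        refine ⟨ihlen, fun m hm => ?_⟩
        rw [ihget m hm]
        constructor
        · rintro ⟨h2m, hall⟩
          refine ⟨h2m, fun r hr hle hdvd => ?_⟩
          by_cases hrp : r = p
          · exact absurd (hrp ▸ hr) hprime
          · exact hall r hr (by omega) hdvd
        · rintro ⟨h2m, hall⟩
          exact ⟨h2m, fun r hr hle hdvd => hall r hr (by omega) hdvd⟩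

lemma pv_sieve (N : Int) (hN : 1 ≤ N) :
    (pvSieve N).length = (N+1).toNat ∧
    ∀ m : Nat, m < (N+1).toNat → (pvSieve N).getD m false = decide (Nat.Prime m) := by
  have hq1 : 1 ≤ N.toNat := by omega
  have hqN : ((N.toNat:Nat):Int) ≤ N := by omega
  have hcast : (N+1 : Int) = ((N.toNat:Nat):Int)+1 := by omega
  unfold pvSieve
  rw [show PySem.List.pyRange 2 (N+1) 1 = PySem.List.pyRange 2 (((N.toNat:Nat):Int)+1) 1 by rw [← hcast]]
  obtain ⟨hlen, hget⟩ := pv_stage N hN N.toNat hq1 hqN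
  refine ⟨hlen, fun m hm => ?_⟩
  have hiff := hget m hm
  have hchar : pvGood N.toNat m ↔ Nat.Prime m := by
    constructor
    · rintro ⟨h2m, hall⟩
      by_contra hnp
      have hne1 : m ≠ 1 := by omega
      have hpf := Nat.minFac_prime hne1
      have hdvd := Nat.minFac_dvd m
      have hle : m.minFac ≤ m := Nat.minFac_le (by omega)
      have hnem : m.minFac ≠ m := fun h => hnp (h ▸ hpf)
      have hmN : m ≤ N.toNat + 1 := by omega
      have : m.minFac ≤ N.toNat := by
        rcases Nat.lt_or_ge m.minFac (N.toNat + 1) with h | h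
        · omega
        · -- minFac = m forced
          omega
      exact hnem (hall m.minFac hpf this hdvd)
    · intro hp
      refine ⟨hp.two_le, fun r hr _ hdvd => ?_⟩
      rcases hp.eq_one_or_self_of_dvd r hdvd with h | h
      · exact absurd h (by have := hr.two_le; omega)
      · exact h
  rcases Bool.eq_false_or_eq_true ((List.foldl (pvSieveStep N) (pvBase N)
      (PySem.List.pyRange 2 (((N.toNat:Nat):Int)+1))).getD m false) with h | h
  · rw [h]
    symm
    rw [decide_eq_true_eq]
    exact hchar.mp (hiff.mp h)
  · rw [h]
    symm
    rw [decide_eq_false_iff_not]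
    intro hp
    have := hiff.mpr (hchar.mpr hp)
    rw [h] at this
    exact Bool.false_ne_true this

lemma pv_foldl_setVals (f : Int → Bool) (b : Int) :
    ∀ (k : Nat) (a : Int) (l : List Bool), (b - a).toNat = k → 0 ≤ a →
    ((PySem.List.pyRange a b 1).foldl (fun d p => PySem.List.pySetD d p (f p)) l).length = l.length ∧
    ∀ m : Nat, ((PySem.List.pyRange a b 1).foldl (fun d p => PySem.List.pySetD d p (f p)) l).getD m false =
      if a ≤ (m:Int) ∧ (m:Int) < b ∧ m < l.length then f (m:Int) else l.getD m false := by
  intro k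
  induction k with
  | zero =>
    intro a l hk ha
    rw [PySem.List.pyRange_one_eq_nil (by omega)]
    refine ⟨rfl, fun m => ?_⟩
    rw [if_neg (by omega)]
    rfl
  | succ k ih =>
    intro a l hk ha
    have hab : a < b := by omega
    rw [PySem.List.pyRange_one_cons hab]
    simp only [List.foldl_cons]
    rw [PySem.List.pySetD_of_nonneg _ _ ha]
    obtain ⟨ihlen, ihget⟩ := ih (a+1) (l.set a.toNat (f a)) (by omega) (by omega)
    simp only [List.length_set] at ihlen ihget
    refine ⟨ihlen, fun m => ?_⟩
    rw [ihget m]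
    by_cases h1 : a+1 ≤ (m:Int) ∧ (m:Int) < b ∧ m < l.length
    · rw [if_pos h1, if_pos (by omega)]
    · rw [if_neg h1, pv_getD_set]
      by_cases h2 : a.toNat = m ∧ m < l.length
      · have hma : ((m:Nat):Int) = a := by omega
        rw [if_pos h2, if_pos (by omega), hma]
      · rw [if_neg h2, if_neg (by omega)]

lemma pv_dummy (N : Int) (hN : 1 ≤ N) :
    (generate_is_prime_sieve N).length = (N+1).toNat ∧
    ∀ m : Nat, m < (N+1).toNat → (generate_is_prime_sieve N).getD m false = pvFlag m := by
  obtain ⟨slen, sget⟩ := pv_sieve N hN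
  unfold generate_is_prime_sieve
  simp only [List.map_id']
  have hfun : (fun (d : List Bool) (p : Int) =>
      if PySem.List.pyGetD (pvSieve N) p false
          && PySem.List.pyGetD (pvSieve N) (PySem.Int.floordiv (p+1) 2) false
        then PySem.List.pySetD d p true else PySem.List.pySetD d p false)
      = (fun d p => PySem.List.pySetD d p
          (PySem.List.pyGetD (pvSieve N) p false
            && PySem.List.pyGetD (pvSieve N) (PySem.Int.floordiv (p+1) 2) false)) := by
    funext d p
    rcases Bool.eq_false_or_eq_true (PySem.List.pyGetD (pvSieve N) p false
        && PySem.List.pyGetD (pvSieve N) (PySem.Int.floordiv (p+1) 2) false) with h | h <;>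
      rw [h] <;> simp
  rw [hfun]
  obtain ⟨flen, fget⟩ := pv_foldl_setVals
    (fun p => PySem.List.pyGetD (pvSieve N) p false
      && PySem.List.pyGetD (pvSieve N) (PySem.Int.floordiv (p+1) 2) false)
    (N+1) (N+1-2).toNat 2 (pvSieve N) rfl (by norm_num)
  refine ⟨by rw [flen, slen], fun m hm => ?_⟩
  rw [fget m]
  by_cases h2 : 2 ≤ m
  · rw [if_pos ⟨by omega, by omega, by omega⟩]
    have hc1 : ((m:Nat):Int) + 1 = (((m+1:Nat)):Int) := by push_cast; ring
    have hc2 : PySem.Int.floordiv (((m+1:Nat)):Int) ((2:Nat):Int) = (((m+1)/2 : Nat):Int) :=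
      PySem.Int.floordiv_natCast (m+1) 2
    have hhalf : (m+1)/2 < (N+1).toNat := by omega
    rw [PySem.List.pyGetD_natCast, hc1]
    rw [show ((2:Int)) = ((2:Nat):Int) by norm_num, hc2, PySem.List.pyGetD_natCast]
    rw [sget m hm, sget _ hhalf]
    rfl
  · rw [if_neg (by omega), sget m hm]
    interval_cases m <;> simp [pvFlag]

lemma pvC_succ (t : Nat) : pvC (t+1) = pvC t + (if pvFlag t then 1 else 0) := by
  unfold pvC
  rw [List.range_succ, List.countP_append]
  rcases Bool.eq_false_or_eq_true (pvFlag t) with h | h <;> simp [h]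

lemma pv_A_loop (N : Int) (hN : 1 ≤ N) (t : Nat) (ht : t ≤ (N+1).toNat) :
    ((PySem.List.pyRange 0 (t:Int) 1).foldl
      (fun (st : Int × List Int) i =>
        let c := if PySem.List.pyGetD (generate_is_prime_sieve N) i false then st.1 + 1 else st.1
        (c, PySem.List.pySetD st.2 i c))
      (0, List.replicate (N+1).toNat 0)).1 = pvC t ∧
    ((PySem.List.pyRange 0 (t:Int) 1).foldl
      (fun (st : Int × List Int) i =>
        let c := if PySem.List.pyGetD (generate_is_prime_sieve N) i false then st.1 + 1 else st.1
        (c, PySem.List.pySetD st.2 i c))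
      (0, List.replicate (N+1).toNat 0)).2.length = (N+1).toNat ∧
    ∀ m : Nat, ((PySem.List.pyRange 0 (t:Int) 1).foldl
      (fun (st : Int × List Int) i =>
        let c := if PySem.List.pyGetD (generate_is_prime_sieve N) i false then st.1 + 1 else st.1
        (c, PySem.List.pySetD st.2 i c))
      (0, List.replicate (N+1).toNat 0)).2.getD m 0 = if m < t then pvC (m+1) else 0 := by
  obtain ⟨dlen, dget⟩ := pv_dummy N hN
  induction t with
  | zero =>
    rw [show ((0:Nat):Int) = 0 by norm_num, PySem.List.pyRange_one_eq_nil le_rfl]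
    simp only [List.foldl_nil]
    refine ⟨rfl, by simp, fun m => ?_⟩
    rw [if_neg (by omega)]
    rcases Nat.lt_or_ge m (N+1).toNat with h | h
    · rw [List.getD_eq_getElem?_getD, List.getElem?_replicate, if_pos h]
      rfl
    · rw [List.getD_eq_getElem?_getD, List.getElem?_eq_none (by simpa using h)]
      rfl
  | succ t ih =>
    obtain ⟨ih1, ihlen, ihget⟩ := ih (by omega)
    have hsplit : PySem.List.pyRange 0 (((t+1:Nat)):Int) 1
        = PySem.List.pyRange 0 ((t:Nat):Int) 1 ++ [((t:Nat):Int)] := by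
      have h : (((t+1:Nat)):Int) = ((t:Nat):Int) + 1 := by push_cast; ring
      rw [h, PySem.List.pyRange_one_succ_right (by positivity)]
    rw [hsplit, List.foldl_append]
    simp only [List.foldl_cons, List.foldl_nil]
    set st := (PySem.List.pyRange 0 ((t:Nat):Int) 1).foldl
      (fun (st : Int × List Int) i =>
        let c := if PySem.List.pyGetD (generate_is_prime_sieve N) i false then st.1 + 1 else st.1
        (c, PySem.List.pySetD st.2 i c))
      (0, List.replicate (N+1).toNat 0) with hst
    have htn : t < (N+1).toNat := by omega
    have hc : (if PySem.List.pyGetD (generate_is_prime_sieve N) ((t:Nat):Int) false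
        then st.1 + 1 else st.1) = pvC (t+1) := by
      rw [PySem.List.pyGetD_natCast, dget t htn, ih1, pvC_succ]
      rcases Bool.eq_false_or_eq_true (pvFlag t) with h | h <;> rw [h] <;> simp
    simp only [hc]
    refine ⟨by simp, ?_, fun m => ?_⟩
    · rw [PySem.List.pySetD_of_nonneg _ _ (by positivity)]
      simp [ihlen]
    · rw [PySem.List.pySetD_of_nonneg _ _ (by positivity)]
      have hset : ∀ (v : Int) (l : List Int) (j m : Nat),
          (l.set j v).getD m 0 = if j = m ∧ m < l.length then v else l.getD m 0 := by
        intro v l j m'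
        simp only [List.getD_eq_getElem?_getD, List.getElem?_set]
        split_ifs <;> simp_all
      rw [hset]
      simp only [Int.toNat_natCast, ihlen]
      by_cases hmt : t = m ∧ m < (N+1).toNat
      · rw [if_pos hmt, if_pos (by omega)]
        rw [hmt.1]
      · rw [if_neg hmt, ihget m]
        by_cases hlt : m < t
        · rw [if_pos hlt, if_pos (by omega)]
        · rw [if_neg hlt, if_neg (by omega)]

lemma pv_B_loop (t : Nat) :
    ((PySem.List.pyRange 0 (t:Int) 1).foldl
      (fun (st : Int × List Int) i =>
        let c := if pyIsPrime i && pyIsPrime (PySem.Int.floordiv (i+1) 2) then st.1 + 1 else st.1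
        (c, st.2 ++ [c]))
      (0, ([] : List Int))) = (pvC t, (List.range t).map (fun m => pvC (m+1))) := by
  induction t with
  | zero =>
    rw [show ((0:Nat):Int) = 0 by norm_num, PySem.List.pyRange_one_eq_nil le_rfl]
    simp [pvC]
  | succ t ih =>
    have hsplit : PySem.List.pyRange 0 (((t+1:Nat)):Int) 1
        = PySem.List.pyRange 0 ((t:Nat):Int) 1 ++ [((t:Nat):Int)] := by
      have h : (((t+1:Nat)):Int) = ((t:Nat):Int) + 1 := by push_cast; ring
      rw [h, PySem.List.pyRange_one_succ_right (by positivity)]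
    rw [hsplit, List.foldl_append, ih]
    simp only [List.foldl_cons, List.foldl_nil]
    have hc1 : ((t:Nat):Int) + 1 = (((t+1:Nat)):Int) := by push_cast; ring
    have hflag : (pyIsPrime ((t:Nat):Int)
        && pyIsPrime (PySem.Int.floordiv (((t:Nat):Int)+1) 2)) = pvFlag t := by
      rw [pv_isPrime, hc1]
      rw [show ((2:Int)) = ((2:Nat):Int) by norm_num, PySem.Int.floordiv_natCast (t+1) 2]
      rw [pv_isPrime]
      rfl
    simp only [hflag]
    have hc : (if pvFlag t then pvC t + 1 else pvC t) = pvC (t+1) := by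
      rw [pvC_succ]
      rcases Bool.eq_false_or_eq_true (pvFlag t) with h | h <;> rw [h] <;> simp
    simp only [hc]
    rw [List.range_succ, List.map_append]
    rfl

theorem pv_main (N : Int) (hN : 1 ≤ N) : partial_sums N = partial_sums_alt N := by
  have hc : (N+1 : Int) = (((N+1).toNat:Nat):Int) := by omega
  have hrange : PySem.List.pyRange 0 (N+1) 1
      = PySem.List.pyRange 0 ((((N+1).toNat:Nat)):Int) 1 := by rw [← hc]
  simp only [partial_sums, partial_sums_alt]
  rw [hrange]
  obtain ⟨h1, hlen, hget⟩ := pv_A_loop N hN (N+1).toNat le_rfl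
  rw [pv_B_loop ((N+1).toNat)]
  apply List.ext_getElem
  · rw [hlen]
    simp
  · intro m hm hm2
    have hmn : m < (N+1).toNat := by rw [← hlen]; exact hm
    have hD := hget m
    rw [List.getD_eq_getElem?_getD, List.getElem?_eq_getElem hm, Option.getD_some,
      if_pos hmn] at hD
    rw [hD]
    simp

-- ===== VERDICT (by name: the statement is the Claim_ definition above) =====
theorem partial_sums_spec : Claim_equal_partial_sums := by
  intro N _ hPre
  unfold Spec_partial_sums
  exact pv_main N hPre
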